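-- pv_equiv track=rewrite | github.com/rodrigorahal/advent-of-code-2018 | 06/chronal_coordinates.py | areas
-- ===== SOURCE A (Python) =====
-- from collections import defaultdict
--
-- def areas(coordinates):
--     internals = internal(coordinates)
--     (minx, maxx), (miny, maxy) = dimensions(coordinates)
--     area_by_coordinate = defaultdict(int)
--
--     for x in range(minx, maxx + 1):
--         for y in range(miny, maxy + 1):
--             base = closest((x, y), coordinates)
--             if base and base in internals:
--                 area_by_coordinate[base] += 1
--
--     return area_by_coordinate
--
-- def internal(coordinates):
--     internals = set()
--     for (x, y) in coordinates:
--         left = right = top = bottom = None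
--         for (nx, ny) in coordinates:
--             if (x, y) != (nx, ny):
--                 if x > nx:
--                     left = (nx, ny)
--                 elif x < nx:
--                     right = (nx, ny)
--                 if y > ny:
--                     top = (nx, ny)
--                 elif y < ny:
--                     bottom = (nx, ny)
--         if all((left, right, top, bottom)):
--             internals.add((x, y))
--     return internals
--
-- def dimensions(coordinates):
--     xs = [x for x, _ in coordinates]
--     ys = [y for _, y in coordinates]
--     return (min(xs), max(xs)), (min(ys), max(ys))
--
-- def distance(a, b):
--     x, y = a
--     nx, ny = b
--     return abs(nx - x) + abs(ny - y)
--
-- def closest(p, coordinates):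
--     dists = sorted([(distance(p, a), a) for a in coordinates])
--
--     return dists[0][1] if dists[0][0] != dists[1][0] else None
-- ===== SOURCE B (Python) =====
-- from collections import defaultdict, Counter
--
-- def areas(coordinates):
--     x0, y0 = coordinates[0]
--     minx = maxx = x0
--     miny = maxy = y0
--     for x, y in coordinates[1:]:
--         if x < minx: minx = x
--         if maxx < x: maxx = x
--         if y < miny: miny = y
--         if maxy < y: maxy = y
--     owners = []
--     for x in range(minx, maxx + 1):
--         for y in range(miny, maxy + 1):
--             o = _nearest_unique((x, y), coordinates)
--             if o is not None and _is_internal(o, coordinates):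
--                 owners.append(o)
--     result = defaultdict(int)
--     result.update(Counter(owners))
--     return result
--
-- def _nearest_unique(p, coordinates):
--     px, py = p
--     best_d = best = None
--     tie = False
--     for (ax, ay) in coordinates:
--         d = abs(ax - px) + abs(ay - py)
--         if best_d is None or d < best_d:
--             best_d, best, tie = d, (ax, ay), False
--         elif d == best_d:
--             tie = True
--     return None if tie else best
--
-- def _is_internal(c, coordinates):
--     x, y = c
--     return (any(nx < x for nx, _ in coordinates)
--             and any(x < nx for nx, _ in coordinates)
--             and any(ny < y for _, ny in coordinates)
--             and any(y < ny for _, ny in coordinates))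
-- ===== Notes on version B (the rewrite author's own statement) =====
-- stated objective: faster
-- what changed: Per grid cell the sort of all (distance, coordinate) tuples is replaced by a single running-minimum pass with a tie flag, the four-flag double loop building the internal set is replaced by direct any() existence tests per candidate owner, the bounding box is computed in one fold, and the result dict is built as a Counter of the owner list instead of in-place defaultdict increments.
-- crash fix: On a one-element list A raises IndexError (reading dists[1]); B returns the empty dict, since the single coordinate has no neighbours on any side and so is never internal. — e.g. on areas([(0, 0)]): A raises IndexError, B returns []
import Mathlib
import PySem

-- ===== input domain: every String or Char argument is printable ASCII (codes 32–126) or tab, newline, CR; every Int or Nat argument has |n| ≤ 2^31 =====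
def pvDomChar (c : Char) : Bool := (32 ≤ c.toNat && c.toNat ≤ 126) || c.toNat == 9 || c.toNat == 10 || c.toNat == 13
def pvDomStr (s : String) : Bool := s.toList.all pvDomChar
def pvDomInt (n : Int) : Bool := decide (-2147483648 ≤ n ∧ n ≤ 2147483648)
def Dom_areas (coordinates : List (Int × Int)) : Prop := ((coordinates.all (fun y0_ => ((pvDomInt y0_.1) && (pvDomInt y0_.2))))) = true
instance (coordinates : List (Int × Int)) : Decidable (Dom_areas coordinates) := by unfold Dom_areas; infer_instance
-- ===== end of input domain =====

-- B replaces the per-cell sort-based closest scan with a one-pass running-minimum fold, the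
-- flag-based internal set with direct existence tests, and builds the result with a Counter
-- over the owner list (objective: faster — drops the O(n log n) sort per grid cell).


-- ===== PORT A =====

-- distance(a, b)
def pvDistance (a b : Int × Int) : Int := |b.1 - a.1| + |b.2 - a.2|

-- closest(p, coordinates).  Python sorts the (distance, coordinate) tuples lexicographically;
-- the function reads only dists[0] and dists[1], whose relevant parts depend only on the
-- distance component (dists[0][1] is read only when the minimal distance is attained by exactly
-- one element of the list), so the stable sort keyed by the distance component is exact here.
def pvClosest (p : Int × Int) (coordinates : List (Int × Int)) : Option (Int × Int) :=
  let dists := PySem.List.sorted (coordinates.map (fun a => (pvDistance p a, a))) (fun t => t.1) false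
  let d0 := PySem.List.pyGetD dists 0 (0, (0, 0))
  let d1 := PySem.List.pyGetD dists 1 (0, (0, 0))
  if d0.1 ≠ d1.1 then some d0.2 else none

-- the body of internal's inner loop: the four flags left/right/top/bottom
def pvInternalStep (c : Int × Int)
    (f : Option (Int × Int) × Option (Int × Int) × Option (Int × Int) × Option (Int × Int))
    (n : Int × Int) :
    Option (Int × Int) × Option (Int × Int) × Option (Int × Int) × Option (Int × Int) :=
  if n ≠ c then
    (if n.1 < c.1 then some n else f.1,
     if c.1 < n.1 then some n else f.2.1,
     if n.2 < c.2 then some n else f.2.2.1,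
     if c.2 < n.2 then some n else f.2.2.2)
  else f

-- internal(coordinates); all((left, right, top, bottom)) is the four is-not-None tests (the
-- flags are nonempty tuples, hence truthy whenever set)
def pvInternal (coordinates : List (Int × Int)) : PySem.Set (Int × Int) :=
  coordinates.foldl (fun s c =>
    let f := coordinates.foldl (pvInternalStep c) (none, none, none, none)
    if f.1.isSome && f.2.1.isSome && f.2.2.1.isSome && f.2.2.2.isSome then PySem.Set.add s c else s)
    PySem.Set.empty

-- dimensions(coordinates); min/max of the empty list raise in Python (outside Pre_), so the
-- defaulted value is never used under Pre_areas
def pvDimensions (coordinates : List (Int × Int)) : (Int × Int) × (Int × Int) :=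
  let xs := coordinates.map (fun v => v.1)
  let ys := coordinates.map (fun v => v.2)
  (((PySem.List.min? xs (fun v => v)).getD 0, (PySem.List.max? xs (fun v => v)).getD 0),
   ((PySem.List.min? ys (fun v => v)).getD 0, (PySem.List.max? ys (fun v => v)).getD 0))

def areas (coordinates : List (Int × Int)) : List (Int × Int × Int) :=
  let internals := pvInternal coordinates
  let dims := pvDimensions coordinates
  let d := (PySem.List.pyRange dims.1.1 (dims.1.2 + 1) 1).foldl (fun d x =>
      (PySem.List.pyRange dims.2.1 (dims.2.2 + 1) 1).foldl (fun d y =>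
        match pvClosest (x, y) coordinates with
        | some base => if internals.contains base then PySem.Dict.modify d base 0 (· + 1) else d
        | none => d) d)
    (PySem.Dict.empty : PySem.Dict (Int × Int) Int)
  d.items.map (fun kv => (kv.1.1, kv.1.2, kv.2))

-- ===== PORT B =====

-- _nearest_unique(p, coordinates): one pass keeping (best distance, first best, tie flag)
def pvNearestUnique (p : Int × Int) (coordinates : List (Int × Int)) : Option (Int × Int) :=
  let st := coordinates.foldl (fun st a =>
      let d := |a.1 - p.1| + |a.2 - p.2|
      match st with
      | none => some (d, a, false)
      | some (bd, ba, tie) =>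
        if d < bd then some (d, a, false)
        else if d = bd then some (bd, ba, true)
        else some (bd, ba, tie)) none
  match st with
  | some (_, ba, false) => some ba
  | _ => none

-- _is_internal(c, coordinates)
def pvIsInternal (c : Int × Int) (coordinates : List (Int × Int)) : Bool :=
  coordinates.any (fun n => n.1 < c.1) && coordinates.any (fun n => c.1 < n.1) &&
  coordinates.any (fun n => n.2 < c.2) && coordinates.any (fun n => c.2 < n.2)

def areas_alt (coordinates : List (Int × Int)) : List (Int × Int × Int) :=
  match coordinates with
  | [] => []   -- coordinates[0] raises in Python (outside Pre_)
  | c0 :: rest =>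
    let bounds := rest.foldl (fun (m : Int × Int × Int × Int) c =>
        (if c.1 < m.1 then c.1 else m.1,
         if m.2.1 < c.1 then c.1 else m.2.1,
         if c.2 < m.2.2.1 then c.2 else m.2.2.1,
         if m.2.2.2 < c.2 then c.2 else m.2.2.2)) (c0.1, c0.1, c0.2, c0.2)
    let owners := (PySem.List.pyRange bounds.1 (bounds.2.1 + 1) 1).foldl (fun acc x =>
        (PySem.List.pyRange bounds.2.2.1 (bounds.2.2.2 + 1) 1).foldl (fun acc y =>
          match pvNearestUnique (x, y) (c0 :: rest) with
          | some o => if pvIsInternal o (c0 :: rest) then acc ++ [o] else acc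
          | none => acc) acc) []
    (PySem.Dict.counter owners).items.map (fun kv => (kv.1.1, kv.1.2, kv.2))

-- ===== PRECONDITION & SPEC =====
-- Pre_ excludes exactly the inputs on which A raises: the empty list (ValueError in min) and a
-- single coordinate (IndexError at dists[1]); A returns normally on every other input.
def Pre_areas (coordinates : List (Int × Int)) : Prop := 2 ≤ coordinates.length
instance (coordinates : List (Int × Int)) : Decidable (Pre_areas coordinates) := by unfold Pre_areas; infer_instance

def pvWitness_areas : (List (Int × Int)) := [(0, 0), (2, 1)]

-- On a one-element list A raises IndexError (at dists[1]) while B returns the empty dict (the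
-- single coordinate is never internal, so no cell is counted).
def Raises_areas (coordinates : List (Int × Int)) : Prop := coordinates.length = 1
instance (coordinates : List (Int × Int)) : Decidable (Raises_areas coordinates) := by unfold Raises_areas; infer_instance
def pvRaiseWitness_areas : (List (Int × Int)) := [(0, 0)]
def pvRaiseWitnessOut_areas : List (Int × Int × Int) := []

def Spec_areas (coordinates : List (Int × Int)) (out : List (Int × Int × Int)) : Prop := out = areas_alt coordinates
instance (coordinates : List (Int × Int)) (out : List (Int × Int × Int)) : Decidable (Spec_areas coordinates out) := by unfold Spec_areas; infer_instance

-- ===== CLAIM (what is proved, stated in full; the proofs are below) =====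
def Claim_equal_areas : Prop := ∀ (coordinates : List (Int × Int)), Dom_areas coordinates → Pre_areas coordinates → Spec_areas coordinates (areas coordinates)
def Claim_raises_areas : Prop := (∀ (coordinates : List (Int × Int)), Dom_areas coordinates → Raises_areas coordinates → ¬ Pre_areas coordinates) ∧ (Dom_areas (pvRaiseWitness_areas) ∧ Raises_areas (pvRaiseWitness_areas) ∧ areas_alt (pvRaiseWitness_areas) = pvRaiseWitnessOut_areas)

-- ===== LEMMAS AND PROOFS =====

theorem bounds_eq (c0 : Int × Int) (rest : List (Int × Int)) :
    (rest.foldl (fun (m : Int × Int × Int × Int) c =>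
        (if c.1 < m.1 then c.1 else m.1,
         if m.2.1 < c.1 then c.1 else m.2.1,
         if c.2 < m.2.2.1 then c.2 else m.2.2.1,
         if m.2.2.2 < c.2 then c.2 else m.2.2.2)) (c0.1, c0.1, c0.2, c0.2))
    = ((pvDimensions (c0 :: rest)).1.1, (pvDimensions (c0 :: rest)).1.2,
       (pvDimensions (c0 :: rest)).2.1, (pvDimensions (c0 :: rest)).2.2) := by
  have h4 : (fun (m : Int × Int × Int × Int) (c : Int × Int) =>
        ((if c.1 < m.1 then c.1 else m.1 : Int),
         (if m.2.1 < c.1 then c.1 else m.2.1 : Int),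
         (if c.2 < m.2.2.1 then c.2 else m.2.2.1 : Int),
         (if m.2.2.2 < c.2 then c.2 else m.2.2.2 : Int)))
      = (fun m c => (min m.1 c.1, max m.2.1 c.1, min m.2.2.1 c.2, max m.2.2.2 c.2)) := by
    funext m c
    simp only [min_def, max_def]
    refine Prod.ext ?_ (Prod.ext ?_ (Prod.ext ?_ ?_)) <;> dsimp <;> split <;> split <;> omega
  rw [h4]
  rw [PySem.List.foldl_prod_mk (f := fun (a : Int) (c : Int × Int) => min a c.1)
        (g := fun (b : Int × Int × Int) (c : Int × Int) => (max b.1 c.1, min b.2.1 c.2, max b.2.2 c.2))]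
  rw [PySem.List.foldl_prod_mk (f := fun (a : Int) (c : Int × Int) => max a c.1)
        (g := fun (b : Int × Int) (c : Int × Int) => (min b.1 c.2, max b.2 c.2))]
  rw [PySem.List.foldl_prod_mk (f := fun (a : Int) (c : Int × Int) => min a c.2)
        (g := fun (a : Int) (c : Int × Int) => max a c.2)]
  simp only [pvDimensions, List.map_cons]
  rw [PySem.List.min?_id_cons, PySem.List.max?_id_cons, PySem.List.min?_id_cons,
      PySem.List.max?_id_cons]
  simp only [Option.getD_some, List.foldl_map]

theorem internalStep_fold (c : Int × Int) :
    ∀ (ns : List (Int × Int))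
      (f₀ : Option (Int × Int) × Option (Int × Int) × Option (Int × Int) × Option (Int × Int)),
      (ns.foldl (pvInternalStep c) f₀).1.isSome
          = (f₀.1.isSome || ns.any (fun n => decide (n.1 < c.1))) ∧
      (ns.foldl (pvInternalStep c) f₀).2.1.isSome
          = (f₀.2.1.isSome || ns.any (fun n => decide (c.1 < n.1))) ∧
      (ns.foldl (pvInternalStep c) f₀).2.2.1.isSome
          = (f₀.2.2.1.isSome || ns.any (fun n => decide (n.2 < c.2))) ∧
      (ns.foldl (pvInternalStep c) f₀).2.2.2.isSome
          = (f₀.2.2.2.isSome || ns.any (fun n => decide (c.2 < n.2))) := by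
  intro ns
  induction ns with
  | nil => intro f₀; simp
  | cons n ns ih =>
    intro f₀
    obtain ⟨h1, h2, h3, h4⟩ := ih (pvInternalStep c f₀ n)
    have hs : ∀ (q : Prop) [Decidable q] (o : Option (Int × Int)),
        (if q then some n else o).isSome = (o.isSome || decide q) := by
      intro q _ o; split <;> simp_all
    refine ⟨?_, ?_, ?_, ?_⟩ <;>
      simp only [List.foldl_cons, List.any_cons, h1, h2, h3, h4] <;>
      by_cases hnc : n = c
    · subst hnc; simp [pvInternalStep]
    · simp only [pvInternalStep, if_pos hnc, hs]; ac_rfl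
    · subst hnc; simp [pvInternalStep]
    · simp only [pvInternalStep, if_pos hnc, hs]; ac_rfl
    · subst hnc; simp [pvInternalStep]
    · simp only [pvInternalStep, if_pos hnc, hs]; ac_rfl
    · subst hnc; simp [pvInternalStep]
    · simp only [pvInternalStep, if_pos hnc, hs]; ac_rfl

theorem internal_eq (coordinates : List (Int × Int)) :
    pvInternal coordinates
      = PySem.Set.ofList (coordinates.filter (fun c => pvIsInternal c coordinates)) := by
  unfold pvInternal
  have hcond : ∀ c : Int × Int,
      (let f := coordinates.foldl (pvInternalStep c) (none, none, none, none)
       f.1.isSome && f.2.1.isSome && f.2.2.1.isSome && f.2.2.2.isSome)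
      = pvIsInternal c coordinates := by
    intro c
    obtain ⟨h1, h2, h3, h4⟩ := internalStep_fold c coordinates (none, none, none, none)
    simp only [h1, h2, h3, h4, Option.isSome_none, Bool.false_or, pvIsInternal]
  have : (fun (s : PySem.Set (Int × Int)) (c : Int × Int) =>
      let f := coordinates.foldl (pvInternalStep c) (none, none, none, none)
      if f.1.isSome && f.2.1.isSome && f.2.2.1.isSome && f.2.2.2.isSome then PySem.Set.add s c else s)
      = (fun s c => if pvIsInternal c coordinates then PySem.Set.add s c else s) := by
    funext s c; rw [← hcond c]
  rw [this, PySem.List.foldl_if_eq_foldl_filter]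
  rfl

theorem internal_contains (coordinates : List (Int × Int)) (b : Int × Int) (hb : b ∈ coordinates) :
    (pvInternal coordinates).contains b = pvIsInternal b coordinates := by
  rw [internal_eq]
  by_cases h : pvIsInternal b coordinates = true
  · rw [h]
    simp [PySem.Set.contains, PySem.Set.mem_ofList, List.mem_filter, hb, h]
  · simp only [Bool.not_eq_true] at h
    rw [h]
    simp [PySem.Set.contains, PySem.Set.mem_ofList, List.mem_filter, h]

-- invariant of B's running-minimum loop over the processed prefix
def pvInv (p : Int × Int) (xs : List (Int × Int)) (st : Option (Int × (Int × Int) × Bool)) : Prop :=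
  match st with
  | none => xs = []
  | some (m, c, tie) =>
      (∀ y ∈ xs, m ≤ pvDistance p y) ∧
      (xs.filter (fun a => pvDistance p a == m)).head? = some c ∧
      (tie = true ↔ 2 ≤ (xs.filter (fun a => pvDistance p a == m)).length)

theorem pvInv_fold (p : Int × Int) :
    ∀ (ns xs : List (Int × Int)) (st : Option (Int × (Int × Int) × Bool)), pvInv p xs st →
      pvInv p (xs ++ ns) (ns.foldl (fun st a =>
        let d := |a.1 - p.1| + |a.2 - p.2|
        match st with
        | none => some (d, a, false)
        | some (bd, ba, tie) =>
          if d < bd then some (d, a, false)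
          else if d = bd then some (bd, ba, true)
          else some (bd, ba, tie)) st) := by
  intro ns
  induction ns with
  | nil => intro xs st h; simpa using h
  | cons a ns ih =>
    intro xs st h
    rw [show xs ++ a :: ns = (xs ++ [a]) ++ ns by simp]
    rw [List.foldl_cons]
    apply ih
    have hda : |a.1 - p.1| + |a.2 - p.2| = pvDistance p a := rfl
    match st with
    | none =>
      have hx : xs = [] := h
      subst hx
      simp only [List.nil_append, hda]
      refine ⟨?_, ?_, ?_⟩
      · intro y hy; simp at hy; subst hy; rfl
      · simp [pvDistance]
      · simp
    | some (m, c, tie) =>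
      obtain ⟨hmin, hhead, htie⟩ := h
      simp only [hda]
      by_cases h1 : pvDistance p a < m
      · simp only [if_pos h1]
        refine ⟨?_, ?_, ?_⟩
        · intro y hy
          rcases List.mem_append.mp hy with hy | hy
          · exact le_trans (le_of_lt h1) (hmin y hy)
          · simp at hy; subst hy; rfl
        · rw [List.filter_append]
          have : xs.filter (fun b => pvDistance p b == pvDistance p a) = [] := by
            rw [List.filter_eq_nil_iff]
            intro b hb
            have := hmin b hb
            simp only [beq_iff_eq]
            omega
          simp [this]
        · rw [List.filter_append]
          have : xs.filter (fun b => pvDistance p b == pvDistance p a) = [] := by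
            rw [List.filter_eq_nil_iff]
            intro b hb
            have := hmin b hb
            simp only [beq_iff_eq]
            omega
          simp [this]
      · by_cases h2 : pvDistance p a = m
        · simp only [if_neg h1, if_pos h2]
          have hFne : xs.filter (fun b => pvDistance p b == m) ≠ [] := by
            intro hnil
            rw [hnil] at hhead
            simp at hhead
          have hFlen : 1 ≤ (xs.filter (fun b => pvDistance p b == m)).length :=
            List.length_pos_iff.mpr hFne
          refine ⟨?_, ?_, ?_⟩
          · intro y hy
            rcases List.mem_append.mp hy with hy | hy
            · exact hmin y hy
            · simp at hy; subst hy; omega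
          · rw [List.filter_append, List.head?_append]
            have : (List.filter (fun b => pvDistance p b == m) xs).head? = some c := hhead
            rw [this]; rfl
          · rw [List.filter_append]
            have ha : [a].filter (fun b => pvDistance p b == m) = [a] := by simp [h2]
            rw [ha, List.length_append]
            simp only [List.length_cons, List.length_nil]
            constructor
            · intro _; omega
            · intro _; trivial
        · have h3 : m < pvDistance p a := by omega
          simp only [if_neg h1, if_neg h2]
          refine ⟨?_, ?_, ?_⟩
          · intro y hy
            rcases List.mem_append.mp hy with hy | hy
            · exact hmin y hy
            · simp at hy; subst hy; omega
          · rw [List.filter_append]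
            have ha : [a].filter (fun b => pvDistance p b == m) = [] := by simp [h2]
            rw [ha, List.append_nil]
            exact hhead
          · rw [List.filter_append]
            have ha : [a].filter (fun b => pvDistance p b == m) = [] := by simp [h2]
            rw [ha, List.append_nil]
            exact htie

theorem nearest_inv (p : Int × Int) (coords : List (Int × Int)) :
    pvInv p coords (coords.foldl (fun st a =>
        let d := |a.1 - p.1| + |a.2 - p.2|
        match st with
        | none => some (d, a, false)
        | some (bd, ba, tie) =>
          if d < bd then some (d, a, false)
          else if d = bd then some (bd, ba, true)
          else some (bd, ba, tie)) none) := by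
  have := pvInv_fold p coords [] none rfl
  simpa using this

theorem closest_eq (p : Int × Int) (coords : List (Int × Int)) (hlen : 2 ≤ coords.length) :
    pvClosest p coords = pvNearestUnique p coords := by
  unfold pvNearestUnique
  simp only []
  show pvClosest p coords = (match List.foldl (fun st (a : Int × Int) =>
      match st with
      | none => some (|a.1 - p.1| + |a.2 - p.2|, a, false)
      | some (bd, ba, tie) =>
        if |a.1 - p.1| + |a.2 - p.2| < bd then some (|a.1 - p.1| + |a.2 - p.2|, a, false)
        else if |a.1 - p.1| + |a.2 - p.2| = bd then some (bd, ba, true)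
        else some (bd, ba, tie)) none coords with
    | some (_, ba, false) => some ba
    | _ => none)
  cases hst : List.foldl (fun st (a : Int × Int) =>
      match st with
      | none => some (|a.1 - p.1| + |a.2 - p.2|, a, false)
      | some (bd, ba, tie) =>
        if |a.1 - p.1| + |a.2 - p.2| < bd then some (|a.1 - p.1| + |a.2 - p.2|, a, false)
        else if |a.1 - p.1| + |a.2 - p.2| = bd then some (bd, ba, true)
        else some (bd, ba, tie)) none coords with
  | none =>
    have hinv : pvInv p coords (none : Option (Int × (Int × Int) × Bool)) := hst ▸ nearest_inv p coords
    have : coords = [] := hinv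
    subst this; simp at hlen
  | some t =>
    obtain ⟨m, c, tie⟩ := t
    have hinv : pvInv p coords (some (m, c, tie)) := hst ▸ nearest_inv p coords
    obtain ⟨hmin, hhead, htie⟩ := hinv
    -- A side
    have hc_mem_F : c ∈ coords.filter (fun a => pvDistance p a == m) :=
      List.mem_of_mem_head? (by rw [hhead]; rfl)
    have hcF := List.mem_filter.mp hc_mem_F
    have hcm : pvDistance p c = m := by simpa using hcF.2
    set l := coords.map (fun a => (pvDistance p a, a)) with hl
    set s := PySem.List.sorted l (fun t => t.1) false with hs
    have hperm : s.Perm l := PySem.List.sorted_perm l _ false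
    have hslen : 2 ≤ s.length := by
      rw [hperm.length_eq, hl, List.length_map]; exact hlen
    obtain ⟨t0, t1, rest, hse⟩ : ∃ t0 t1 rest, s = t0 :: t1 :: rest := by
      match s, hslen with
      | x :: y :: r, _ => exact ⟨x, y, r, rfl⟩
    have hpw := PySem.List.sorted_pairwise l (fun t => t.1)
    rw [← hs, hse] at hpw
    have hle : ∀ y ∈ l, t0.1 ≤ y.1 := by
      have := PySem.List.key_head_sorted_le l (fun t => t.1) (by rw [← hs, hse])
      simpa using this
    have ht0l : t0 ∈ l := hperm.mem_iff.mp (by rw [hse]; exact List.mem_cons_self)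
    obtain ⟨b0, hb0c, hb0⟩ := List.mem_map.mp ht0l
    have ht0m : t0.1 = m := by
      have h1 : t0.1 ≤ pvDistance p c := by
        have : (pvDistance p c, c) ∈ l := List.mem_map.mpr ⟨c, hcF.1, rfl⟩
        simpa using hle _ this
      have h2 : m ≤ t0.1 := by
        rw [← hb0]; exact hmin b0 hb0c
    -- hmm wait: pvDistance of b0: t0.1 = (pvDistance p b0); hmin gives m ≤ pvDistance p b0
      omega
    have hcnt : (s.countP (fun t => t.1 == m)) = (coords.filter (fun a => pvDistance p a == m)).length := by
      rw [hperm.countP_eq, hl, List.countP_map, ← List.countP_eq_length_filter]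
      rfl
    have hA1 : t1.1 = m ↔ 2 ≤ (coords.filter (fun a => pvDistance p a == m)).length := by
      rw [← hcnt, hse]
      constructor
      · intro h
        simp [h, ht0m]
      · intro h
        by_contra hne
        have h01 : t0.1 ≤ t1.1 := (List.pairwise_cons.mp hpw).1 t1 List.mem_cons_self
        have hmt1 : m < t1.1 := by rw [ht0m] at h01; omega
        have h1r : ∀ b ∈ rest, t1.1 ≤ b.1 :=
          (List.pairwise_cons.mp (List.pairwise_cons.mp hpw).2).1
        have hr0 : rest.countP (fun t => t.1 == m) = 0 := by
          rw [List.countP_eq_zero]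
          intro b hb
          have := h1r b hb
          simp only [beq_iff_eq]
          omega
        simp [hr0, hne, ht0m] at h
    -- compute pvClosest
    unfold pvClosest
    rw [← hl, ← hs, hse]
    have hg0 : PySem.List.pyGetD (t0 :: t1 :: rest) (0 : Int) ((0 : Int), ((0 : Int), (0 : Int))) = t0 :=
      PySem.List.pyGetD_zero_cons _ _ _
    have hg1 : PySem.List.pyGetD (t0 :: t1 :: rest) (1 : Int) ((0 : Int), ((0 : Int), (0 : Int))) = t1 := by
      simp [PySem.List.pyGetD, PySem.List.pyGet?, PySem.List.pyIdx?]
    simp only [hg0, hg1]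
    cases tie with
    | true =>
      have hF2 : 2 ≤ (coords.filter (fun a => pvDistance p a == m)).length := htie.mp rfl
      have : t1.1 = m := hA1.mpr hF2
      rw [if_neg (by rw [this, ht0m]; simp)]
    | false =>
      have hF1 : (coords.filter (fun a => pvDistance p a == m)).length ≤ 1 := by
        by_contra hgt
        have h2' : 2 ≤ (coords.filter (fun a => pvDistance p a == m)).length := by omega
        exact Bool.false_ne_true (htie.mpr h2')
      have hne : t1.1 ≠ t0.1 := by
        rw [ht0m]
        intro h
        have := hA1.mp h
        omega
      rw [if_pos (by exact fun h => hne h.symm)]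
      -- t0.2 = c
      have hFeq : coords.filter (fun a => pvDistance p a == m) = [c] := by
        have hlen1 : (coords.filter (fun a => pvDistance p a == m)).length = 1 := by
          have := List.length_pos_iff.mpr (List.ne_nil_of_mem hc_mem_F)
          omega
        obtain ⟨x, hx⟩ := List.length_eq_one_iff.mp hlen1
        rw [hx] at hc_mem_F
        simp at hc_mem_F
        rw [hx, hc_mem_F]
      have hb0F : b0 ∈ coords.filter (fun a => pvDistance p a == m) := by
        rw [List.mem_filter]
        refine ⟨hb0c, ?_⟩
        have : pvDistance p b0 = t0.1 := by rw [← hb0]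
        simp [this, ht0m]
      rw [hFeq] at hb0F
      simp at hb0F
      have : t0.2 = c := by rw [← hb0, ← hb0F]
      rw [this]

theorem nearest_mem (p : Int × Int) (coords : List (Int × Int)) (b : Int × Int)
    (h : pvNearestUnique p coords = some b) : b ∈ coords := by
  have h' : (match List.foldl (fun st (a : Int × Int) =>
      match st with
      | none => some (|a.1 - p.1| + |a.2 - p.2|, a, false)
      | some (bd, ba, tie) =>
        if |a.1 - p.1| + |a.2 - p.2| < bd then some (|a.1 - p.1| + |a.2 - p.2|, a, false)
        else if |a.1 - p.1| + |a.2 - p.2| = bd then some (bd, ba, true)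
        else some (bd, ba, tie)) none coords with
    | some (_, ba, false) => some ba
    | _ => none) = some b := h
  revert h'
  cases hst : List.foldl (fun st (a : Int × Int) =>
      match st with
      | none => some (|a.1 - p.1| + |a.2 - p.2|, a, false)
      | some (bd, ba, tie) =>
        if |a.1 - p.1| + |a.2 - p.2| < bd then some (|a.1 - p.1| + |a.2 - p.2|, a, false)
        else if |a.1 - p.1| + |a.2 - p.2| = bd then some (bd, ba, true)
        else some (bd, ba, tie)) none coords with
  | none => intro h'; simp at h'
  | some t =>
    obtain ⟨m, c, tie⟩ := t
    have hinv : pvInv p coords (some (m, c, tie)) := hst ▸ nearest_inv p coords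
    obtain ⟨hmin, hhead, htie⟩ := hinv
    intro h'
    cases tie with
    | true => simp at h'
    | false =>
      have hb : b = c := by simpa using h'.symm
      subst hb
      have hmemF : b ∈ List.filter (fun a => pvDistance p a == m) coords :=
        List.mem_of_mem_head? (by rw [hhead]; rfl)
      exact (List.mem_filter.mp hmemF).1

-- proof-only helper: the owner a grid cell is counted for, if any
def pvOwner (coords : List (Int × Int)) (pnt : Int × Int) : Option (Int × Int) :=
  match pvNearestUnique pnt coords with
  | some b => if pvIsInternal b coords then some b else none
  | none => none

-- proof-only helper: the owner list of the whole grid, in grid order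
def pvOwners (coords : List (Int × Int)) (xs ys : List Int) : List (Int × Int) :=
  xs.flatMap (fun x => ys.filterMap (fun y => pvOwner coords (x, y)))

theorem stepA_owner (coords : List (Int × Int)) (h2 : 2 ≤ coords.length)
    (pnt : Int × Int) (d : PySem.Dict (Int × Int) Int) :
    (match pvClosest pnt coords with
     | some base => if (pvInternal coords).contains base then PySem.Dict.modify d base 0 (· + 1) else d
     | none => d)
    = (match pvOwner coords pnt with
       | some b => PySem.Dict.modify d b 0 (· + 1)
       | none => d) := by
  rw [closest_eq pnt coords h2]
  unfold pvOwner
  cases hn : pvNearestUnique pnt coords with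
  | none => rfl
  | some b =>
    have hb := nearest_mem pnt coords b hn
    dsimp only
    rw [internal_contains coords b hb]
    cases hib : pvIsInternal b coords <;> simp

theorem innerA (coords : List (Int × Int)) (x : Int) :
    ∀ (ys : List Int) (d : PySem.Dict (Int × Int) Int),
      ys.foldl (fun d y =>
        match pvOwner coords (x, y) with
        | some b => PySem.Dict.modify d b 0 (· + 1)
        | none => d) d
      = (ys.filterMap (fun y => pvOwner coords (x, y))).foldl
          (fun d b => PySem.Dict.modify d b 0 (· + 1)) d := by
  intro ys
  induction ys with
  | nil => intro d; rfl
  | cons y ys ih =>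
    intro d
    rw [List.foldl_cons, List.filterMap_cons]
    cases h : pvOwner coords (x, y) with
    | none => rw [ih]
    | some b => rw [List.foldl_cons, ih]

theorem outerA (coords : List (Int × Int)) (ys : List Int) :
    ∀ (xs : List Int) (d : PySem.Dict (Int × Int) Int),
      xs.foldl (fun d x => ys.foldl (fun d y =>
        match pvOwner coords (x, y) with
        | some b => PySem.Dict.modify d b 0 (· + 1)
        | none => d) d) d
      = (pvOwners coords xs ys).foldl (fun d b => PySem.Dict.modify d b 0 (· + 1)) d := by
  intro xs
  induction xs with
  | nil => intro d; rfl
  | cons x xs ih =>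
    intro d
    rw [List.foldl_cons, ih, innerA]
    unfold pvOwners
    rw [List.flatMap_cons, List.foldl_append]

theorem innerB (coords : List (Int × Int)) (x : Int) :
    ∀ (ys : List Int) (acc : List (Int × Int)),
      ys.foldl (fun acc y =>
        match pvNearestUnique (x, y) coords with
        | some o => if pvIsInternal o coords then acc ++ [o] else acc
        | none => acc) acc
      = acc ++ ys.filterMap (fun y => pvOwner coords (x, y)) := by
  intro ys
  induction ys with
  | nil => intro acc; simp
  | cons y ys ih =>
    intro acc
    rw [List.foldl_cons, List.filterMap_cons]
    cases hn : pvNearestUnique (x, y) coords with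
    | none =>
      rw [show pvOwner coords (x, y) = none by simp [pvOwner, hn]]
      exact ih acc
    | some o =>
      cases hib : pvIsInternal o coords
      · rw [show pvOwner coords (x, y) = none by simp [pvOwner, hn, hib]]
        dsimp only
        rw [hib]
        simp only [Bool.false_eq_true, if_false]
        exact ih acc
      · rw [show pvOwner coords (x, y) = some o by simp [pvOwner, hn, hib]]
        dsimp only
        rw [hib]
        simp only [if_true]
        rw [ih (acc ++ [o]), List.append_assoc]
        rfl

theorem outerB (coords : List (Int × Int)) (ys : List Int) :
    ∀ (xs : List Int) (acc : List (Int × Int)),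
      xs.foldl (fun acc x => ys.foldl (fun acc y =>
        match pvNearestUnique (x, y) coords with
        | some o => if pvIsInternal o coords then acc ++ [o] else acc
        | none => acc) acc) acc
      = acc ++ pvOwners coords xs ys := by
  intro xs
  induction xs with
  | nil => intro acc; simp [pvOwners]
  | cons x xs ih =>
    intro acc
    rw [List.foldl_cons, innerB, ih]
    unfold pvOwners
    rw [List.flatMap_cons, List.append_assoc]

theorem grid_dict_eq (coords : List (Int × Int)) (h2 : 2 ≤ coords.length) (xs ys : List Int) :
    xs.foldl (fun d x => ys.foldl (fun d y =>
      match pvClosest (x, y) coords with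
      | some base => if (pvInternal coords).contains base then PySem.Dict.modify d base 0 (· + 1) else d
      | none => d) d) (PySem.Dict.empty : PySem.Dict (Int × Int) Int)
    = PySem.Dict.counter (xs.foldl (fun acc x => ys.foldl (fun acc y =>
        match pvNearestUnique (x, y) coords with
        | some o => if pvIsInternal o coords then acc ++ [o] else acc
        | none => acc) acc) []) := by
  have hstep : (fun (d : PySem.Dict (Int × Int) Int) (x : Int) => ys.foldl (fun d y =>
      match pvClosest (x, y) coords with
      | some base => if (pvInternal coords).contains base then PySem.Dict.modify d base 0 (· + 1) else d
      | none => d) d)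
      = (fun d x => ys.foldl (fun d y =>
      match pvOwner coords (x, y) with
      | some b => PySem.Dict.modify d b 0 (· + 1)
      | none => d) d) := by
    funext d x
    exact PySem.List.foldl_congr_mem ys _ _ d (fun d' y _ => stepA_owner coords h2 (x, y) d')
  rw [hstep, outerA, outerB, PySem.Dict.counter_eq_foldl, List.nil_append]

theorem areas_eq (coordinates : List (Int × Int)) (hpre : 2 ≤ coordinates.length) :
    areas coordinates = areas_alt coordinates := by
  match coordinates, hpre with
  | c0 :: rest, hpre =>
    unfold areas areas_alt
    simp only []
    rw [bounds_eq c0 rest]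
    simp only []
    rw [grid_dict_eq (c0 :: rest) hpre]

-- ===== VERDICT (by name: the statement is the Claim_ definition above) =====
theorem areas_spec : Claim_equal_areas := by
  intro coordinates _ hpre
  unfold Spec_areas
  exact areas_eq coordinates hpre

@[simp] theorem areas_raises : Claim_raises_areas := by
  unfold Claim_raises_areas
  exact ⟨fun c _ h => by unfold Raises_areas at h; unfold Pre_areas; omega, by decide⟩
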